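-- pv_equiv track=rewrite | github.com/pbentkowski/MHC_Evolution | PyScripts/packed_plots_of_MHC_alleles.py | lookForVAR
-- ===== SOURCE A (Python) =====
-- def lookForVAR(template):
--     """Checks which parameters are designated to be investigated as independent
--     variables. Gets their line numbers in the file with parameter
--     description."""
--     varrs = {"VAR": 0, "VARX": 0}
--     for ii, itm in enumerate(template):
--         if itm == "VAR":
--             varrs["VAR"] = ii
--         elif itm == "VARX":
--             varrs["VARX"] = ii
--         else:
--             pass
--     return varrs
-- ===== SOURCE B (Python) =====
-- def lookForVAR(template):
--     """Checks which parameters are designated to be investigated as independent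
--     variables. Gets their line numbers in the file with parameter
--     description."""
--     lst = list(template)
--     varrs = {"VAR": 0, "VARX": 0}
--     found_var = False
--     found_varx = False
--     for i in range(len(lst) - 1, -1, -1):
--         itm = lst[i]
--         if not found_var and itm == "VAR":
--             varrs["VAR"] = i
--             found_var = True
--         elif not found_varx and itm == "VARX":
--             varrs["VARX"] = i
--             found_varx = True
--         if found_var and found_varx:
--             break
--     return varrs
-- ===== Notes on version B (the rewrite author's own statement) =====
-- stated objective: alternative
-- what changed: B scans the list backwards keeping found-flags for VAR/VARX, records the first hit of each (= last occurrence) and breaks once both are found, instead of A's forward pass that overwrites the dict entry on every match.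
import Mathlib
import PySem

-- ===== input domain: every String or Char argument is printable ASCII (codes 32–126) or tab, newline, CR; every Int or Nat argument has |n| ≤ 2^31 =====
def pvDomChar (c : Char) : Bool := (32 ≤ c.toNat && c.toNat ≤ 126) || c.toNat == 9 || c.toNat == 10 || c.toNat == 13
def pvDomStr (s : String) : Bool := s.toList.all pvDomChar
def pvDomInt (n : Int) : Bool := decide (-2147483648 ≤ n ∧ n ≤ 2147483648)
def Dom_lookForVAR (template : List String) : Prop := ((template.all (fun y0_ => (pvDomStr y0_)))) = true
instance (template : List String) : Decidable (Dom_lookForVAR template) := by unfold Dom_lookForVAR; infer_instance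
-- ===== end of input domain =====

-- B replaces A's forward overwrite-on-every-match pass by a backward scan with
-- found-flags that records the first (i.e. last-in-order) hit of each marker and
-- breaks once both are found; same return value, different traversal (objective: alternative).

-- ===== PORT A =====
def lookForVAR (template : List String) : List (String × Int) :=
  let varrs : PySem.Dict String Int := PySem.Dict.ofList [("VAR", 0), ("VARX", 0)]
  let varrs := (PySem.List.enumerate template).foldl
    (fun d (p : Int × String) =>
      if p.2 = "VAR" then d.insert "VAR" p.1
      else if p.2 = "VARX" then d.insert "VARX" p.1
      else d) varrs
  varrs.items

-- ===== PORT B =====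
-- the loop 'for i in range(len(lst)-1, -1, -1)' with its break, as a countdown
-- recursion on the index; lst[i] is always in range there, so getD is exact
def lookForVAR_altLoop (lst : List String) : Nat → Bool → Bool → Int → Int → Int × Int
  | 0, _, _, v, x => (v, x)
  | Nat.succ n, fv, fx, v, x =>
    let itm := lst.getD n ""
    if ¬fv ∧ itm = "VAR" then
      (if fx then ((n : Int), x) else lookForVAR_altLoop lst n true fx (n : Int) x)
    else if ¬fx ∧ itm = "VARX" then
      (if fv then (v, (n : Int)) else lookForVAR_altLoop lst n fv true v (n : Int))
    else
      (if fv ∧ fx then (v, x) else lookForVAR_altLoop lst n fv fx v x)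

def lookForVAR_alt (template : List String) : List (String × Int) :=
  let lst := template
  let r := lookForVAR_altLoop lst lst.length false false 0 0
  [("VAR", r.1), ("VARX", r.2)]

-- ===== PRECONDITION & SPEC =====
def Spec_lookForVAR (template : List String) (out : List (String × Int)) : Prop := out = lookForVAR_alt template
instance (template : List String) (out : List (String × Int)) : Decidable (Spec_lookForVAR template out) := by unfold Spec_lookForVAR; infer_instance

-- ===== CLAIM (what is proved, stated in full; the proofs are below) =====
def Claim_equal_lookForVAR : Prop := ∀ (template : List String), Dom_lookForVAR template → Spec_lookForVAR template (lookForVAR template)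

-- ===== LEMMAS AND PROOFS =====

-- last index of s in t, if any
def pvLo? : List String → String → Option Nat
  | [], _ => none
  | h :: r, s => match pvLo? r s with
    | some j => some (j + 1)
    | none => if h = s then some 0 else none

def pvOut (t : List String) (s : String) : Int :=
  match pvLo? t s with
  | some j => (j : Int)
  | none => 0

theorem pvLo?_append_singleton (t : List String) (a s : String) :
    pvLo? (t ++ [a]) s = if a = s then some t.length else pvLo? t s := by
  induction t with
  | nil => simp [pvLo?]
  | cons h r ih =>
      simp only [List.cons_append, pvLo?, ih, List.length_cons]
      split_ifs <;> rcases hr : pvLo? r s <;> simp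

theorem pvInsV (a b v : Int) :
    (PySem.Dict.mk [("VAR", a), ("VARX", b)] : PySem.Dict String Int).insert "VAR" v
      = PySem.Dict.mk [("VAR", v), ("VARX", b)] := by
  apply PySem.Dict.ext
  simp [PySem.Dict.insert, PySem.Dict.contains]

theorem pvInsX (a b v : Int) :
    (PySem.Dict.mk [("VAR", a), ("VARX", b)] : PySem.Dict String Int).insert "VARX" v
      = PySem.Dict.mk [("VAR", a), ("VARX", v)] := by
  apply PySem.Dict.ext
  simp [PySem.Dict.insert, PySem.Dict.contains]

-- state of A's forward pass
def pvLastV : List String → String → Int → Int → Int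
  | [], _, _, d => d
  | h :: t, s, k, d => pvLastV t s (k + 1) (if h = s then k else d)

theorem pvLastV_eq (t : List String) (s : String) : ∀ (k d : Int),
    pvLastV t s k d = match pvLo? t s with | some j => k + (j : Int) | none => d := by
  induction t with
  | nil => intro k d; simp [pvLastV, pvLo?]
  | cons h r ih =>
      intro k d
      simp only [pvLastV, pvLo?, ih]
      rcases hr : pvLo? r s with _ | j
      · split_ifs <;> simp
      · push_cast; ring

theorem lookForVAR_items (t : List String) : ∀ (k a b : Int),
    ((PySem.List.enumerate t k).foldl
      (fun d (p : Int × String) =>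
        if p.2 = "VAR" then d.insert "VAR" p.1
        else if p.2 = "VARX" then d.insert "VARX" p.1
        else d) (PySem.Dict.mk [("VAR", a), ("VARX", b)])).items
      = [("VAR", pvLastV t "VAR" k a), ("VARX", pvLastV t "VARX" k b)] := by
  induction t with
  | nil => intro k a b; simp [PySem.List.enumerate_nil, pvLastV]
  | cons h r ih =>
      intro k a b
      rw [PySem.List.enumerate_cons]
      simp only [List.foldl_cons, pvLastV]
      by_cases h1 : h = "VAR"
      · have h2 : h ≠ "VARX" := by subst h1; decide
        simp only [h1, reduceIte, String.reduceEq, if_false, pvInsV, ih]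
      · by_cases h2 : h = "VARX"
        · simp only [h2, reduceIte, String.reduceEq, if_false, pvInsX, ih]
        · simp only [h1, h2, if_false, ih]

-- state of B's backward pass, up to (excl.) index n
def pvLastB (lst : List String) (s : String) : Nat → Int
  | 0 => 0
  | Nat.succ n => if lst.getD n "" = s then (n : Int) else pvLastB lst s n

theorem pvNe : ("VAR" : String) ≠ "VARX" := by decide

theorem altLoop_eq (lst : List String) : ∀ (n : Nat) (fv fx : Bool) (v x : Int),
    (fv = false → v = 0) → (fx = false → x = 0) →
    lookForVAR_altLoop lst n fv fx v x
      = (if fv then v else pvLastB lst "VAR" n, if fx then x else pvLastB lst "VARX" n) := by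
  intro n
  induction n with
  | zero =>
      intro fv fx v x hv hx
      cases fv <;> cases fx <;> simp_all [lookForVAR_altLoop, pvLastB]
  | succ n ih =>
      intro fv fx v x hv hx
      simp only [lookForVAR_altLoop, pvLastB]
      by_cases hitm : lst.getD n "" = "VAR"
      · have h2 : lst.getD n "" ≠ "VARX" := by rw [hitm]; exact pvNe
        cases fv <;> cases fx <;> simp_all [ih, List.getD]
      · by_cases hitm2 : lst.getD n "" = "VARX"
        · cases fv <;> cases fx <;> simp_all [List.getD]
        · cases fv <;> cases fx <;> simp_all [List.getD]

theorem pvLastB_eq (lst : List String) (s : String) : ∀ (n : Nat), n ≤ lst.length →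
    pvLastB lst s n = pvOut (lst.take n) s := by
  intro n
  induction n with
  | zero => intro _; simp [pvLastB, pvOut, pvLo?]
  | succ n ih =>
      intro hn
      have hn' : n < lst.length := hn
      have htake : lst.take (n + 1) = lst.take n ++ [lst[n]] := by
        rw [List.take_add_one]; simp [List.getElem?_eq_getElem hn']
      simp only [pvLastB, pvOut, htake, pvLo?_append_singleton, List.length_take,
        Nat.min_eq_left (Nat.le_of_lt hn'), List.getD_eq_getElem lst "" hn']
      split_ifs with h
      · rfl
      · exact ih (Nat.le_of_lt hn')

theorem pvLastV_eq_out (t : List String) (s : String) :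
    pvLastV t s 0 0 = pvOut t s := by
  rw [pvLastV_eq]; unfold pvOut; rcases pvLo? t s <;> simp

-- ===== VERDICT (by name: the statement is the Claim_ definition above) =====
theorem lookForVAR_spec : Claim_equal_lookForVAR := by
  intro template _
  unfold Spec_lookForVAR lookForVAR lookForVAR_alt
  have hA := lookForVAR_items template 0 0 0
  have hB := altLoop_eq template template.length false false 0 0 (fun _ => rfl) (fun _ => rfl)
  simp only [] at *
  rw [show (PySem.Dict.ofList [("VAR", (0:Int)), ("VARX", 0)]) = PySem.Dict.mk [("VAR", 0), ("VARX", 0)] from rfl] 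
  rw [hA, hB]
  simp [pvLastV_eq_out, pvLastB_eq template _ template.length le_rfl, List.take_length]
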